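-- pv_equiv track=rewrite | github.com/ucsb-caliber/caliber-milestone-one | backend/app/variant_gen/question_contract.py | _fr_variant_covers_cs_terms
-- ===== SOURCE A (Python) =====
-- _FR_CS_SYNONYM_GROUPS = (
--     frozenset({
--         "sequence", "sequences", "tuple", "tuples", "string", "strings",
--         "list", "lists", "iterable", "iterables", "array", "arrays",
--     }),
--     frozenset({"dictionary", "dictionaries", "dict"}),
--     frozenset({"set", "sets"}),
--     frozenset({"recursion", "recursive"}),
--     frozenset({"boolean", "booleans"}),
-- )
--
-- _ALL_FR_CS_GROUP_TERMS = frozenset().union(*_FR_CS_SYNONYM_GROUPS)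
--
-- def _fr_variant_covers_cs_terms(o_kw: set, v_kw: set) -> bool:
--     if o_kw & v_kw:
--         return True
--     for g in _FR_CS_SYNONYM_GROUPS:
--         if o_kw & g and not (v_kw & g):
--             return False
--     leftover = o_kw - _ALL_FR_CS_GROUP_TERMS
--     return not leftover or bool(leftover & v_kw)
-- ===== SOURCE B (Python) =====
-- _FR_CS_SYNONYM_GROUPS = (
--     frozenset({
--         "sequence", "sequences", "tuple", "tuples", "string", "strings",
--         "list", "lists", "iterable", "iterables", "array", "arrays",
--     }),
--     frozenset({"dictionary", "dictionaries", "dict"}),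
--     frozenset({"set", "sets"}),
--     frozenset({"recursion", "recursive"}),
--     frozenset({"boolean", "booleans"}),
-- )
--
-- TERM_TO_GROUP = {t: g for g in _FR_CS_SYNONYM_GROUPS for t in g}
--
-- def _fr_variant_covers_cs_terms(o_kw: set, v_kw: set) -> bool:
--     if o_kw & v_kw:
--         return True
--     for t in o_kw:
--         g = TERM_TO_GROUP.get(t)
--         if g is None or not (v_kw & g):
--             return False
--     return True
-- ===== Notes on version B (the rewrite author's own statement) =====
-- stated objective: alternative
-- what changed: B indexes each synonym term to its group in a module-level dict and judges per term of o_kw (lookup + group-overlap test), instead of A's scan over the five groups followed by a leftover-set subtraction; the dead 'leftover & v_kw' branch disappears.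
import Mathlib
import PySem

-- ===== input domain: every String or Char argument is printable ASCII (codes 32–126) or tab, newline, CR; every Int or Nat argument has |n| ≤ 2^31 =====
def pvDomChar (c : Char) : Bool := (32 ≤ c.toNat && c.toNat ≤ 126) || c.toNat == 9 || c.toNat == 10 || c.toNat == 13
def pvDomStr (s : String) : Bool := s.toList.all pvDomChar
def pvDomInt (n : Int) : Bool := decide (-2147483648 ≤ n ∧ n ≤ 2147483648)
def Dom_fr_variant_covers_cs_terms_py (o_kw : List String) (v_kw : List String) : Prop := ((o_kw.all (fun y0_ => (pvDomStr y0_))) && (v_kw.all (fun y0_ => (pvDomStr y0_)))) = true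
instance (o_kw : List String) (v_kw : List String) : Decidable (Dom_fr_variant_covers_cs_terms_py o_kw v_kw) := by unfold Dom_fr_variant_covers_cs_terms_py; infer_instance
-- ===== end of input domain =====

-- B looks each o_kw term up in a term→group index instead of scanning the five groups and subtracting a leftover set; objective: alternative decomposition (same behaviour).
-- ===== PORT A =====
def pvG1 : List String := ["sequence", "sequences", "tuple", "tuples", "string", "strings", "list", "lists", "iterable", "iterables", "array", "arrays"]
def pvG2 : List String := ["dictionary", "dictionaries", "dict"]
def pvG3 : List String := ["set", "sets"]
def pvG4 : List String := ["recursion", "recursive"]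
def pvG5 : List String := ["boolean", "booleans"]
def pvGroups : List (List String) := [pvG1, pvG2, pvG3, pvG4, pvG5]
-- frozenset().union(*_FR_CS_SYNONYM_GROUPS): the groups are pairwise disjoint and each is duplicate-free,
-- so the union as a set is exactly the deduplicated concatenation (exact for membership, the only use).
def pvAllTerms : List String := PySem.Set.ofList pvGroups.flatten

def pvALoop (o_kw v_kw : List String) : List (List String) → Bool
  | [] =>
    let leftover := PySem.Set.diff o_kw pvAllTerms
    leftover.isEmpty || !(PySem.Set.inter leftover v_kw).isEmpty
  | g :: gs =>
    if !(PySem.Set.inter o_kw g).isEmpty && (PySem.Set.inter v_kw g).isEmpty then false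
    else pvALoop o_kw v_kw gs

def fr_variant_covers_cs_terms_py (o_kw : List String) (v_kw : List String) : Bool :=
  if !(PySem.Set.inter o_kw v_kw).isEmpty then true
  else pvALoop o_kw v_kw pvGroups

-- ===== PORT B =====
-- TERM_TO_GROUP = {t: g for g in _FR_CS_SYNONYM_GROUPS for t in g} (keys unique: groups disjoint; only looked up)
def pvTermToGroup : PySem.Dict String (List String) := PySem.Dict.mk [
  ("sequence", pvG1),
  ("sequences", pvG1),
  ("tuple", pvG1),
  ("tuples", pvG1),
  ("string", pvG1),
  ("strings", pvG1),
  ("list", pvG1),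
  ("lists", pvG1),
  ("iterable", pvG1),
  ("iterables", pvG1),
  ("array", pvG1),
  ("arrays", pvG1),
  ("dictionary", pvG2),
  ("dictionaries", pvG2),
  ("dict", pvG2),
  ("set", pvG3),
  ("sets", pvG3),
  ("recursion", pvG4),
  ("recursive", pvG4),
  ("boolean", pvG5),
  ("booleans", pvG5)]

def pvBLoop (v_kw : List String) : List String → Bool
  | [] => true
  | t :: ts =>
    match PySem.Dict.get? pvTermToGroup t with
    | none => false
    | some g => if (PySem.Set.inter v_kw g).isEmpty then false else pvBLoop v_kw ts

def fr_variant_covers_cs_terms_py_alt (o_kw : List String) (v_kw : List String) : Bool :=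
  if !(PySem.Set.inter o_kw v_kw).isEmpty then true
  else pvBLoop v_kw o_kw

-- ===== PRECONDITION & SPEC =====
def Spec_fr_variant_covers_cs_terms_py (o_kw : List String) (v_kw : List String) (out : Bool) : Prop := out = fr_variant_covers_cs_terms_py_alt o_kw v_kw
instance (o_kw : List String) (v_kw : List String) (out : Bool) : Decidable (Spec_fr_variant_covers_cs_terms_py o_kw v_kw out) := by unfold Spec_fr_variant_covers_cs_terms_py; infer_instance

-- ===== CLAIM (what is proved, stated in full; the proofs are below) =====
def Claim_equal_fr_variant_covers_cs_terms_py : Prop := ∀ (o_kw : List String) (v_kw : List String), Dom_fr_variant_covers_cs_terms_py o_kw v_kw → Spec_fr_variant_covers_cs_terms_py o_kw v_kw (fr_variant_covers_cs_terms_py o_kw v_kw)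

-- ===== LEMMAS AND PROOFS =====
set_option maxHeartbeats 4000000 in
lemma lookup_of_mem_group (g : List String) (t : String) (hg : g ∈ pvGroups) (ht : t ∈ g) :
    PySem.Dict.get? pvTermToGroup t = some g := by
  simp only [pvGroups, List.mem_cons, List.not_mem_nil, or_false] at hg
  rcases hg with rfl | rfl | rfl | rfl | rfl <;> fin_cases ht <;> decide

set_option maxHeartbeats 4000000 in
lemma lookup_sound (t : String) (g : List String)
    (h : PySem.Dict.get? pvTermToGroup t = some g) : g ∈ pvGroups ∧ t ∈ g := by
  have ht : t ∈ pvTermToGroup.keys := by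
    by_contra hn
    rw [← PySem.Dict.get?_eq_none_iff_not_mem_keys] at hn
    rw [hn] at h
    simp at h
  simp only [pvTermToGroup, PySem.Dict.keys_mk, List.map_cons, List.map_nil] at ht
  fin_cases ht <;> (injection h with h2; subst h2; decide)

lemma bLoop_all (v_kw : List String) (o : List String) :
    pvBLoop v_kw o = o.all (fun t =>
      match PySem.Dict.get? pvTermToGroup t with
      | none => false
      | some g => !(PySem.Set.inter v_kw g).isEmpty) := by
  induction o with
  | nil => rfl
  | cons t ts ih =>
    simp only [pvBLoop, List.all_cons, ← ih]
    cases PySem.Dict.get? pvTermToGroup t with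
    | none => rfl
    | some g => cases h : PySem.Set.inter v_kw g <;> simp [h]

lemma aLoop_all (o v : List String) (gs : List (List String)) :
    pvALoop o v gs = (gs.all (fun g =>
        !(!(PySem.Set.inter o g).isEmpty && (PySem.Set.inter v g).isEmpty)) &&
      (let leftover := PySem.Set.diff o pvAllTerms
       leftover.isEmpty || !(PySem.Set.inter leftover v).isEmpty)) := by
  induction gs with
  | nil => simp [pvALoop]
  | cons g gs ih =>
    simp only [pvALoop, List.all_cons, ih]
    split_ifs with h <;> simp [h]

lemma inter_eq_nil_iff (s t : List String) :
    PySem.Set.inter s t = [] ↔ ∀ x ∈ s, x ∉ t := by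
  rw [List.eq_nil_iff_forall_not_mem]
  constructor
  · intro h x hs ht
    exact h x ((PySem.Set.mem_inter s t x).mpr ⟨hs, ht⟩)
  · intro h x hx
    obtain ⟨hs, ht⟩ := (PySem.Set.mem_inter s t x).mp hx
    exact h x hs ht

lemma mem_allTerms_iff (t : String) :
    t ∈ pvAllTerms ↔ ∃ g ∈ pvGroups, t ∈ g := by
  simp [pvAllTerms, PySem.Set.mem_ofList, List.mem_flatten]

lemma main_eq (o v : List String) (hdisj : ∀ t, t ∈ o → t ∉ v) :
    pvALoop o v pvGroups = pvBLoop v o := by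
  rw [bLoop_all, aLoop_all]
  rw [Bool.eq_iff_iff]
  have hlv : PySem.Set.inter (PySem.Set.diff o pvAllTerms) v = [] := by
    rw [inter_eq_nil_iff]
    intro x hx
    exact hdisj x ((PySem.Set.mem_diff o pvAllTerms x).mp hx).1
  simp only [Bool.and_eq_true, List.all_eq_true, Bool.or_eq_true, Bool.not_eq_eq_eq_not,
    Bool.not_true, Bool.and_eq_false_iff, List.isEmpty_iff, hlv,
    List.isEmpty_nil, Bool.not_false, List.eq_nil_iff_forall_not_mem,
    PySem.Set.mem_diff, not_and, not_not]
  constructor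
  · rintro ⟨hall, hleft⟩ t hto
    rcases hleft with hleft | hfalse
    swap
    · exact absurd hfalse (by simp)
    have htall : t ∈ pvAllTerms := hleft t hto
    obtain ⟨g, hg, htg⟩ := (mem_allTerms_iff t).mp htall
    rw [lookup_of_mem_group g t hg htg]
    have := hall g hg
    rcases this with h1 | h2
    · exact absurd ((PySem.Set.mem_inter o g t).mpr ⟨hto, htg⟩) (by simp [h1])
    · simpa [List.isEmpty_iff] using h2
  · intro hB
    constructor
    · intro g hg
      by_cases hne : PySem.Set.inter o g = []
      · exact Or.inl (by simp [hne])
      · right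
        obtain ⟨t, htin⟩ := List.exists_mem_of_ne_nil _ hne
        obtain ⟨hto, htg⟩ := (PySem.Set.mem_inter o g t).mp htin
        have hb := hB t hto
        cases hget : PySem.Dict.get? pvTermToGroup t with
        | none => rw [hget] at hb; exact absurd hb (by simp)
        | some g2 =>
          have heq : g2 = g := by
            have := lookup_of_mem_group g t hg htg
            rw [hget] at this; exact (Option.some.inj this)
          rw [hget, heq] at hb
          simpa [List.isEmpty_iff] using hb
    · left
      intro t hto
      have hb := hB t hto
      cases hget : PySem.Dict.get? pvTermToGroup t with
      | none => rw [hget] at hb; exact absurd hb (by simp)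
      | some g =>
        obtain ⟨hg, htg⟩ := lookup_sound t g hget
        exact (mem_allTerms_iff t).mpr ⟨g, hg, htg⟩

-- ===== VERDICT (by name: the statement is the Claim_ definition above) =====
theorem fr_variant_covers_cs_terms_py_spec : Claim_equal_fr_variant_covers_cs_terms_py := by
  intro o v _
  unfold Spec_fr_variant_covers_cs_terms_py fr_variant_covers_cs_terms_py fr_variant_covers_cs_terms_py_alt
  split_ifs with h
  · rfl
  · apply main_eq
    intro t hto htv
    apply h
    have : t ∈ PySem.Set.inter o v := (PySem.Set.mem_inter o v t).mpr ⟨hto, htv⟩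
    cases hi : PySem.Set.inter o v with
    | nil => rw [hi] at this; exact absurd this (List.not_mem_nil)
    | cons a l => simp
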